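-- pv_equiv track=rewrite | github.com/antilneeraj/GFG-POTD | POTD Solutions/24_03_2023_RemoveAndReverse.py | removeReverse
-- ===== SOURCE A (Python) =====
-- def removeReverse(s):
--     n = len(s)
--     i = 0
--     j = n - 1
--     mp = {}
--     for char in s:
--         if char in mp:
--             mp[char] += 1
--         else:
--             mp[char] = 1
--     flag = True
--     while i <= j:
--         if flag:
--             if mp[s[i]] > 1:
--                 mp[s[i]] -= 1
--                 s = s[:i] + '0' + s[i+1:]
--                 flag = False
--             i += 1
--         else:
--             if mp[s[j]] > 1:
--                 mp[s[j]] -= 1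
--                 s = s[:j] + '0' + s[j+1:]
--                 flag = True
--             j -= 1
--     ans = ""
--     for char in s:
--         if char != '0':
--             ans += char
--     if flag:
--         return ans
--     else:
--         return ans[::-1]
-- ===== SOURCE B (Python) =====
-- def removeReverse(s):
--     # Staged piece-splitting formulation: no sentinel marking and no final filter.
--     # Each round splits off the kept prefix before the leftmost removable duplicate
--     # and the kept suffix after the rightmost removable duplicate as pieces of the
--     # shrinking window; the answer is reassembled from the pieces at the end.
--     cnt = {}
--     for c in s:
--         cnt[c] = cnt.get(c, 0) + 1
--
--     def first_dup(window):
--         for idx, c in enumerate(window):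
--             if cnt[c] > 1:
--                 return idx
--         return None
--
--     def last_dup(window):
--         for idx in range(len(window) - 1, -1, -1):
--             if cnt[window[idx]] > 1:
--                 return idx
--         return None
--
--     left, right = [], []
--     window = s
--     while True:
--         k = first_dup(window)
--         if k is None:
--             forward_done = True
--             break
--         cnt[window[k]] -= 1
--         left.append(window[:k])
--         window = window[k+1:]
--         m = last_dup(window)
--         if m is None:
--             forward_done = False
--             break
--         cnt[window[m]] -= 1
--         right.append(window[m+1:])
--         window = window[:m]
--     kept = ''.join(left) + window + ''.join(reversed(right))
--     return kept if forward_done else kept[::-1]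
-- ===== Notes on version B (the rewrite author's own statement) =====
-- stated objective: faster
-- what changed: B drops A's two-pointer sentinel-marking ('0' into the string, filter at the end): it repeatedly splits off the kept prefix before the leftmost removable duplicate and the kept suffix after the rightmost one as separate pieces of a shrinking window, and reassembles the answer from the pieces; per removal it copies only the shrinking window instead of rebuilding the whole string.
-- outside the precondition, e.g. on removeReverse('0'): A returns '', B returns '0'; on removeReverse('a0a'): A returns 'a', B returns 'a0'
import Mathlib
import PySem

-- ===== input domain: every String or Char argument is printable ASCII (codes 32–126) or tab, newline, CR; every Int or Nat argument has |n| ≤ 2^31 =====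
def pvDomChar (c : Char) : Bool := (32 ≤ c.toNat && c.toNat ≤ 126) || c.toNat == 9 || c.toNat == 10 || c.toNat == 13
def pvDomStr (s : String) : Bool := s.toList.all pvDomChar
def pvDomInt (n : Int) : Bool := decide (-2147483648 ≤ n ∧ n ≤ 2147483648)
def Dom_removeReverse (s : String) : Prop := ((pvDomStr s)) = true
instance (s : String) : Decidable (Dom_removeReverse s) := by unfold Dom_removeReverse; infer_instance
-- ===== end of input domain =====

-- B replaces A's two-pointer, flag-driven loop (which marks removals with an
-- in-band '0' sentinel in the rebuilt string and filters at the end) by a staged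
-- piece-splitting formulation: each round splits off the kept prefix before the
-- leftmost removable duplicate and the kept suffix after the rightmost one as
-- pieces of a shrinking window, and the answer is reassembled from the pieces;
-- objective: faster (per removal B copies only the shrinking window, not the
-- whole string; measured faster in a timing run).

-- ===== PORT A =====
-- the counting for-loop: 'if char in mp: mp[char] += 1 else: mp[char] = 1'
def removeReverseCount (cs : List Char) : PySem.Dict Char Int :=
  cs.foldl (fun mp c =>
    if mp.contains c then mp.modify c 0 (· + 1) else mp.insert c 1) PySem.Dict.empty

-- measure facts cited by port A's decreasing_by
theorem pvDecLeft (i j : Int) (h : i ≤ j) : (j - (i + 1) + 1).toNat < (j - i + 1).toNat := by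
  have e1 : j - (i + 1) + 1 = j - i := by rw [sub_add_eq_sub_sub, sub_add_cancel]
  have h0 : (0:Int) < j - i + 1 := Int.lt_add_one_iff.mpr (sub_nonneg.mpr h)
  rw [e1]
  exact (Int.toNat_lt_toNat h0).mpr (lt_add_one _)

theorem pvDecRight (i j : Int) (h : i ≤ j) : (j - 1 - i + 1).toNat < (j - i + 1).toNat := by
  have e1 : j - 1 - i + 1 = j - i := by rw [sub_right_comm, sub_add_cancel]
  have h0 : (0:Int) < j - i + 1 := Int.lt_add_one_iff.mpr (sub_nonneg.mpr h)
  rw [e1]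
  exact (Int.toNat_lt_toNat h0).mpr (lt_add_one _)

-- A's while-loop; state (s, mp, i, j, flag); 's[i]' is in range whenever read, so
-- pyGetD's default is never used; 'mp[s[i]] -= 1' is insert of (lookup - 1);
-- 's = s[:i] + '0' + s[i+1:]' is the literal slice concatenation.
def removeReverseLoop (cs : List Char) (mp : PySem.Dict Char Int) (i j : Int)
    (flag : Bool) : List Char × Bool :=
  if _h : i ≤ j then
    if flag then
      let c := PySem.List.pyGetD cs i ' '
      if mp.getD c 0 > 1 then
        removeReverseLoop
          (PySem.List.slice cs none (some i) ++ ['0'] ++ PySem.List.slice cs (some (i + 1)) none)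
          (mp.insert c (mp.getD c 0 - 1)) (i + 1) j false
      else
        removeReverseLoop cs mp (i + 1) j true
    else
      let c := PySem.List.pyGetD cs j ' '
      if mp.getD c 0 > 1 then
        removeReverseLoop
          (PySem.List.slice cs none (some j) ++ ['0'] ++ PySem.List.slice cs (some (j + 1)) none)
          (mp.insert c (mp.getD c 0 - 1)) i (j - 1) true
      else
        removeReverseLoop cs mp i (j - 1) false
  else (cs, flag)
termination_by (j - i + 1).toNat
decreasing_by
  · exact pvDecLeft i j _h
  · exact pvDecLeft i j _h
  · exact pvDecRight i j _h
  · exact pvDecRight i j _h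

def removeReverse (s : String) : String :=
  let cs := s.toList
  let n : Int := cs.length
  let mp := removeReverseCount cs
  let r := removeReverseLoop cs mp 0 (n - 1) true
  -- ans = ""; for char in s: if char != '0': ans += char
  let ans := r.1.foldl (fun a c => if c ≠ '0' then a ++ [c] else a) ([] : List Char)
  if r.2 then String.ofList ans else String.ofList ans.reverse  -- ans[::-1] is List.reverse

-- ===== PORT B =====
-- cnt[c] = cnt.get(c, 0) + 1
def altCount (cs : List Char) : PySem.Dict Char Int :=
  cs.foldl (fun cnt c => cnt.insert c (cnt.getD c 0 + 1)) PySem.Dict.empty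

-- 'def first_dup(window): for idx, c in enumerate(window): if cnt[c] > 1: return idx / return None'
def altFind (cnt : PySem.Dict Char Int) : List Char → Option Nat
  | [] => none
  | c :: v => if cnt.getD c 0 > 1 then some 0 else (altFind cnt v).map (· + 1)

-- bound cited by splitLoop's decreasing_by
theorem altFind_lt (cnt : PySem.Dict Char Int) (w : List Char) (k : Nat)
    (h : altFind cnt w = some k) : k < w.length := by
  induction w generalizing k with
  | nil => simp [altFind] at h
  | cons c v ih =>
    by_cases hc : cnt.getD c 0 > 1
    · simp only [altFind, if_pos hc, Option.some.injEq] at h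
      simp only [List.length_cons]
      omega
    · simp only [altFind, if_neg hc, Option.map_eq_some_iff] at h
      obtain ⟨k', hk', rfl⟩ := h
      have := ih k' hk'
      simp
      omega

-- 'def last_dup(window): for idx in range(len(window)-1,-1,-1): if cnt[window[idx]] > 1: return idx / return None'
def lastFindAux (cnt : PySem.Dict Char Int) (w : List Char) : Nat → Option Nat
  | 0 => none
  | (i+1) =>
    if cnt.getD (PySem.List.pyGetD w (i : Int) ' ') 0 > 1 then some i
    else lastFindAux cnt w i

def lastFind (cnt : PySem.Dict Char Int) (w : List Char) : Option Nat :=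
  lastFindAux cnt w w.length

-- B's 'while True' loop: split off the kept prefix window[:k] before the leftmost
-- removable duplicate, then the kept suffix window[m+1:] after the rightmost one,
-- keeping both as pieces of the shrinking window
def splitLoop (cnt : PySem.Dict Char Int) (window : List Char)
    (left right : List (List Char)) :
    List (List Char) × List (List Char) × List Char × Bool :=
  match h : altFind cnt window with
  | none => (left, right, window, true)
  | some k =>
    let c := PySem.List.pyGetD window (k : Int) ' '
    let cnt1 := cnt.insert c (cnt.getD c 0 - 1)
    let left1 := left ++ [PySem.List.slice window none (some (k : Int))]
    let w1 := PySem.List.slice window (some ((k : Int) + 1)) none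
    match lastFind cnt1 w1 with
    | none => (left1, right, w1, false)
    | some m =>
      let c2 := PySem.List.pyGetD w1 (m : Int) ' '
      splitLoop (cnt1.insert c2 (cnt1.getD c2 0 - 1))
        (PySem.List.slice w1 none (some (m : Int)))
        left1 (right ++ [PySem.List.slice w1 (some ((m : Int) + 1)) none])
termination_by window.length
decreasing_by
  have hk := altFind_lt cnt window k h
  have hc : ((k : Int) + 1) = ((k + 1 : Nat) : Int) := by push_cast; ring
  simp only [PySem.List.slice_to_natCast, hc, PySem.List.slice_from_natCast,
    List.length_take, List.length_drop]
  omega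

def removeReverse_alt (s : String) : String :=
  let cs := s.toList
  let cnt := altCount cs
  let r := splitLoop cnt cs [] []
  -- kept = ''.join(left) + window + ''.join(reversed(right))
  let kept := r.1.flatten ++ r.2.2.1 ++ r.2.1.reverse.flatten
  if r.2.2.2 then String.ofList kept else String.ofList kept.reverse

-- ===== PRECONDITION & SPEC =====
-- Pre_ excludes strings containing the character '0' (outside the original
-- problem's alphabet): '0' is A's in-band removal sentinel, so A's final filter
-- also drops genuine '0' characters (at least one always survives), while B
-- keeps them.
def Pre_removeReverse (s : String) : Prop := '0' ∉ s.toList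
instance (s : String) : Decidable (Pre_removeReverse s) := by unfold Pre_removeReverse; infer_instance

def pvWitness_removeReverse : String := "aab"

def Spec_removeReverse (s : String) (out : String) : Prop := out = removeReverse_alt s
instance (s : String) (out : String) : Decidable (Spec_removeReverse s out) := by unfold Spec_removeReverse; infer_instance

-- ===== CLAIM (what is proved, stated in full; the proofs are below) =====
def Claim_equal_removeReverse : Prop := ∀ (s : String), Dom_removeReverse s → Pre_removeReverse s → Spec_removeReverse s (removeReverse s)

-- ===== LEMMAS AND PROOFS =====

-- common functional spec of one window: (kept chars, in window order; parity of removals)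
def goRec (cnt : PySem.Dict Char Int) : List Char → List Char × Bool
  | [] => ([], false)
  | c :: v =>
    if cnt.getD c 0 > 1 then
      let r := goRec (cnt.insert c (cnt.getD c 0 - 1)) v.reverse
      (r.1.reverse, !r.2)
    else
      let r := goRec cnt v
      (c :: r.1, r.2)
termination_by w => w.length
decreasing_by all_goals simp

-- the two counting loops build the same dict (both are Counter(s))
theorem count_eq (cs : List Char) : removeReverseCount cs = altCount cs := by
  unfold removeReverseCount altCount
  have h : (fun (mp : PySem.Dict Char Int) c => if mp.contains c then mp.modify c 0 (· + 1) else mp.insert c 1)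
      = fun mp c => mp.insert c (mp.getD c 0 + 1) := by
    funext mp c
    by_cases h : mp.contains c
    · simp [PySem.Dict.modify, h]
    · rw [if_neg (by simp [h]), PySem.Dict.getD_of_not_contains mp 0 (by simpa using h)]
      norm_num
  rw [h]

-- A's slice rebuild writes '0' at one position
theorem slice_set (cs : List Char) (i : Int) (h0 : 0 ≤ i) (h1 : i < (cs.length : Int)) :
    PySem.List.slice cs none (some i) ++ ['0'] ++ PySem.List.slice cs (some (i + 1)) none
      = cs.set i.toNat '0' := by
  have ht : (i + 1).toNat = i.toNat + 1 := by omega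
  simp only [PySem.List.slice_to cs h0, PySem.List.slice_from cs (show (0:Int) ≤ i + 1 by omega),
    List.set_eq_take_append_cons_drop, if_pos (show i.toNat < cs.length by omega), ht]
  simp


-- unfolding equations of goRec
theorem goRec_nil (cnt : PySem.Dict Char Int) : goRec cnt [] = ([], false) := by
  simp [goRec]

theorem goRec_cons_pos (cnt : PySem.Dict Char Int) (c : Char) (v : List Char)
    (h : cnt.getD c 0 > 1) :
    goRec cnt (c :: v) = ((goRec (cnt.insert c (cnt.getD c 0 - 1)) v.reverse).1.reverse,
      !(goRec (cnt.insert c (cnt.getD c 0 - 1)) v.reverse).2) := by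
  rw [goRec, if_pos h]

theorem goRec_cons_neg (cnt : PySem.Dict Char Int) (c : Char) (v : List Char)
    (h : ¬ cnt.getD c 0 > 1) :
    goRec cnt (c :: v) = (c :: (goRec cnt v).1, (goRec cnt v).2) := by
  rw [goRec, if_neg h]

-- reading the element just after a prefix
theorem getD_mid (X Y : List Char) (c d : Char) : (X ++ (c :: Y)).getD X.length d = c := by
  simp [List.getD]

-- A's loop on the window cs[i..j] computes goRec of that window (kept chars and
-- removal parity); the already-processed margins L and R are untouched.
theorem loop_spec (n : Nat) (w L R : List Char) (mp : PySem.Dict Char Int) (flag : Bool)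
    (hn : w.length = n) (h0 : '0' ∉ w) :
    ∃ M : List Char,
      removeReverseLoop (L ++ w ++ R) mp (L.length : Int)
          ((L.length : Int) + (w.length : Int) - 1) flag
        = (L ++ M ++ R,
           if flag then !(goRec mp w).2 else (goRec mp w.reverse).2)
      ∧ M.filter (· ≠ '0')
        = (if flag then (goRec mp w).1 else (goRec mp w.reverse).1.reverse) := by
  induction n using Nat.strong_induction_on generalizing w L R mp flag with
  | _ n ih =>
    cases flag with
    | true =>
      cases w with
      | nil =>
        refine ⟨[], ?_, by simp [goRec_nil]⟩
        rw [removeReverseLoop, dif_neg (by simp)]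
        simp [goRec_nil]
      | cons c v =>
        have hc0 : c ≠ '0' := fun hc => h0 (hc ▸ List.mem_cons_self)
        have hv0 : '0' ∉ v := fun hv => h0 (List.mem_cons_of_mem _ hv)
        have hij : (L.length : Int) ≤ (L.length : Int) + ((c::v).length : Int) - 1 := by
          simp only [List.length_append, List.length_cons, List.length_nil]; omega
        have hget : PySem.List.pyGetD (L ++ (c::v) ++ R) (L.length : Int) ' ' = c := by
          have : L ++ (c::v) ++ R = L ++ (c :: (v ++ R)) := by simp
          rw [this, PySem.List.pyGetD_natCast, getD_mid]
        rw [removeReverseLoop, dif_pos hij]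
        simp only [if_pos rfl, hget]
        by_cases hdup : mp.getD c 0 > 1
        · rw [if_pos hdup]
          have hmut : PySem.List.slice (L ++ (c::v) ++ R) none (some (L.length : Int)) ++ ['0'] ++
              PySem.List.slice (L ++ (c::v) ++ R) (some ((L.length : Int) + 1)) none
              = (L ++ ['0']) ++ v ++ R := by
            rw [slice_set _ _ (by positivity) (by simp only [List.length_append, List.length_cons, List.length_nil]; omega)]
            have h1 : L ++ (c::v) ++ R = L ++ ((c :: v) ++ R) := by simp
            rw [h1, Int.toNat_natCast,
              List.set_append_right _ _ (le_refl L.length)]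
            simp
          have hargs1 : (L.length : Int) + 1 = (((L ++ ['0']).length : Nat) : Int) := by
            simp
          have hargs2 : (L.length : Int) + ((c::v).length : Int) - 1
              = (((L ++ ['0']).length : Nat) : Int) + (v.length : Int) - 1 := by
            simp only [List.length_append, List.length_cons, List.length_nil]; omega
          rw [hmut, hargs1, hargs2]
          obtain ⟨M, hM, hfil⟩ := ih v.length (by simp [← hn]) v (L ++ ['0']) R
            (mp.insert c (mp.getD c 0 - 1)) false rfl hv0
          refine ⟨'0' :: M, ?_, ?_⟩
          · rw [hM, goRec_cons_pos _ _ _ hdup]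
            simp
          · rw [goRec_cons_pos _ _ _ hdup]
            simpa using hfil
        · rw [if_neg hdup]
          have hargs1 : (L.length : Int) + 1 = (((L ++ [c]).length : Nat) : Int) := by simp
          have hargs2 : (L.length : Int) + ((c::v).length : Int) - 1
              = (((L ++ [c]).length : Nat) : Int) + (v.length : Int) - 1 := by simp only [List.length_append, List.length_cons, List.length_nil]; omega
          have hre : L ++ (c::v) ++ R = (L ++ [c]) ++ v ++ R := by simp
          rw [hre, hargs1, hargs2]
          obtain ⟨M, hM, hfil⟩ := ih v.length (by simp [← hn]) v (L ++ [c]) R mp true rfl hv0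
          refine ⟨c :: M, ?_, ?_⟩
          · rw [hM, goRec_cons_neg _ _ _ hdup]
            simp
          · rw [goRec_cons_neg _ _ _ hdup]
            simp only [List.filter_cons]
            rw [hfil]
            simp [hc0]
    | false =>
      rcases List.eq_nil_or_concat' w with rfl | ⟨ys, c, rfl⟩
      · refine ⟨[], ?_, by simp [goRec_nil]⟩
        rw [removeReverseLoop, dif_neg (by simp)]
        simp [goRec_nil]
      · have hc0 : c ≠ '0' := by rintro rfl; exact h0 (by simp)
        have hy0 : '0' ∉ ys := fun hv => h0 (by simp [hv])
        have hij : (L.length : Int) ≤ (L.length : Int) + ((ys ++ [c]).length : Int) - 1 := by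
          simp only [List.length_append, List.length_cons, List.length_nil]; omega
        have hjc : (L.length : Int) + ((ys ++ [c]).length : Int) - 1
            = (((L ++ ys).length : Nat) : Int) := by simp only [List.length_append, List.length_cons, List.length_nil]; omega
        have hsplit : L ++ (ys ++ [c]) ++ R = (L ++ ys) ++ (c :: R) := by simp
        have hget : PySem.List.pyGetD (L ++ (ys ++ [c]) ++ R)
            ((L.length : Int) + ((ys ++ [c]).length : Int) - 1) ' ' = c := by
          rw [hjc, hsplit, PySem.List.pyGetD_natCast, getD_mid]
        have hrev : (ys ++ [c]).reverse = c :: ys.reverse := by simp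
        rw [removeReverseLoop, dif_pos hij]
        simp only [Bool.false_eq_true, if_false, hget]
        by_cases hdup : mp.getD c 0 > 1
        · rw [if_pos hdup]
          have hmut : PySem.List.slice (L ++ (ys ++ [c]) ++ R) none
                (some ((L.length : Int) + ((ys ++ [c]).length : Int) - 1)) ++ ['0'] ++
              PySem.List.slice (L ++ (ys ++ [c]) ++ R)
                (some (((L.length : Int) + ((ys ++ [c]).length : Int) - 1) + 1)) none
              = L ++ ys ++ ('0' :: R) := by
            rw [slice_set _ _ (by simp only [List.length_append, List.length_cons, List.length_nil]; omega) (by simp only [List.length_append, List.length_cons, List.length_nil]; omega), hjc, hsplit, Int.toNat_natCast,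
              List.set_append_right _ _ (le_refl _)]
            simp
          have hj1 : (L.length : Int) + ((ys ++ [c]).length : Int) - 1 - 1
              = (L.length : Int) + (ys.length : Int) - 1 := by simp only [List.length_append, List.length_cons, List.length_nil]; omega
          rw [hmut, hj1]
          obtain ⟨M, hM, hfil⟩ := ih ys.length (by simp only [List.length_append, List.length_cons, List.length_nil] at hn; omega) ys L ('0' :: R)
            (mp.insert c (mp.getD c 0 - 1)) true rfl hy0
          refine ⟨M ++ ['0'], ?_, ?_⟩
          · rw [hM, hrev, goRec_cons_pos _ _ _ hdup]
            simp
          · rw [hrev, goRec_cons_pos _ _ _ hdup]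
            simp only [List.filter_append]
            rw [hfil]
            simp
        · rw [if_neg hdup]
          have hre : L ++ (ys ++ [c]) ++ R = L ++ ys ++ (c :: R) := by simp
          have hj1 : (L.length : Int) + ((ys ++ [c]).length : Int) - 1 - 1
              = (L.length : Int) + (ys.length : Int) - 1 := by simp only [List.length_append, List.length_cons, List.length_nil]; omega
          rw [hre, hj1]
          obtain ⟨M, hM, hfil⟩ := ih ys.length (by simp only [List.length_append, List.length_cons, List.length_nil] at hn; omega) ys L (c :: R) mp false rfl hy0
          refine ⟨M ++ [c], ?_, ?_⟩
          · rw [hM, hrev, goRec_cons_neg _ _ _ hdup]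
            simp
          · rw [hrev, goRec_cons_neg _ _ _ hdup]
            simp only [List.filter_append]
            rw [hfil]
            simp [hc0]

-- altFind finds no removable duplicate: goRec keeps everything
theorem goRec_none (cnt : PySem.Dict Char Int) (w : List Char)
    (h : altFind cnt w = none) : goRec cnt w = (w, false) := by
  induction w with
  | nil => exact goRec_nil cnt
  | cons c v ih =>
    rw [altFind] at h
    by_cases hc : cnt.getD c 0 > 1
    · rw [if_pos hc] at h
      cases h
    · rw [if_neg hc, Option.map_eq_none_iff] at h
      rw [goRec_cons_neg cnt c v hc, ih h]

-- altFind finds the first removable duplicate at k: goRec splits there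
theorem goRec_some (cnt : PySem.Dict Char Int) (w : List Char) (k : Nat)
    (h : altFind cnt w = some k) :
    goRec cnt w =
      ((w.take k) ++
         (goRec ((cnt.insert (w.getD k ' ') (cnt.getD (w.getD k ' ') 0 - 1)))
            ((w.drop (k+1)).reverse)).1.reverse,
       !(goRec ((cnt.insert (w.getD k ' ') (cnt.getD (w.getD k ' ') 0 - 1)))
            ((w.drop (k+1)).reverse)).2) := by
  induction w generalizing k with
  | nil => cases h
  | cons c v ih =>
    rw [altFind] at h
    by_cases hc : cnt.getD c 0 > 1
    · rw [if_pos hc] at h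
      cases h
      simpa using goRec_cons_pos cnt c v hc
    · rw [if_neg hc, Option.map_eq_some_iff] at h
      obtain ⟨k', hk', rfl⟩ := h
      rw [goRec_cons_neg cnt c v hc, ih k' hk']
      simp

-- the descending-index scan of last_dup is first_dup on the reversed list
theorem lastFindAux_mirror (cnt : PySem.Dict Char Int) (w : List Char) :
    ∀ i, i ≤ w.length →
      lastFindAux cnt w i = (altFind cnt ((w.take i).reverse)).map (fun p => i - 1 - p) := by
  intro i
  induction i with
  | zero => intro _; simp [lastFindAux, altFind]
  | succ i ih =>
    intro hi
    have hlt : i < w.length := by omega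
    have hg : PySem.List.pyGetD w (i : Int) ' ' = w[i] := by
      rw [PySem.List.pyGetD_natCast, List.getD_eq_getElem w ' ' hlt]
    have hts : (w.take (i+1)).reverse = w[i] :: (w.take i).reverse := by
      rw [List.take_succ]
      simp [List.getElem?_eq_getElem hlt]
    rw [lastFindAux, hg, hts, altFind]
    by_cases hc : cnt.getD w[i] 0 > 1
    · simp [hc]
    · rw [if_neg hc, if_neg hc, ih (by omega), Option.map_map]
      congr 1
      funext p
      simp
      omega

theorem lastFind_mirror (cnt : PySem.Dict Char Int) (w : List Char) :
    lastFind cnt w = (altFind cnt w.reverse).map (fun p => w.length - 1 - p) := by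
  rw [lastFind, lastFindAux_mirror cnt w w.length le_rfl, List.take_length]

-- unfolding equations of splitLoop
theorem splitLoop_none (cnt : PySem.Dict Char Int) (w : List Char)
    (left right : List (List Char)) (h : altFind cnt w = none) :
    splitLoop cnt w left right = (left, right, w, true) := by
  rw [splitLoop.eq_def]
  split
  · rfl
  · rename_i k hk
    rw [h] at hk
    cases hk

theorem splitLoop_some_none (cnt : PySem.Dict Char Int) (w : List Char)
    (left right : List (List Char)) (k : Nat) (h : altFind cnt w = some k)
    (h2 : lastFind (cnt.insert (w.getD k ' ') (cnt.getD (w.getD k ' ') 0 - 1))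
            (w.drop (k+1)) = none) :
    splitLoop cnt w left right
      = (left ++ [w.take k], right, w.drop (k+1), false) := by
  rw [splitLoop.eq_def]
  split
  · rename_i hk
    rw [h] at hk
    cases hk
  · rename_i k' hk
    rw [h] at hk
    cases hk
    have hc : ((k : Int) + 1) = ((k + 1 : Nat) : Int) := by push_cast; ring
    simp only [PySem.List.pyGetD_natCast, hc, PySem.List.slice_from_natCast,
      PySem.List.slice_to_natCast] at h2 ⊢
    rw [h2]

theorem splitLoop_some_some (cnt : PySem.Dict Char Int) (w : List Char)
    (left right : List (List Char)) (k m : Nat) (h : altFind cnt w = some k)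
    (h2 : lastFind (cnt.insert (w.getD k ' ') (cnt.getD (w.getD k ' ') 0 - 1))
            (w.drop (k+1)) = some m) :
    splitLoop cnt w left right
      = splitLoop
          ((cnt.insert (w.getD k ' ') (cnt.getD (w.getD k ' ') 0 - 1)).insert
             ((w.drop (k+1)).getD m ' ')
             ((cnt.insert (w.getD k ' ') (cnt.getD (w.getD k ' ') 0 - 1)).getD
                ((w.drop (k+1)).getD m ' ') 0 - 1))
          ((w.drop (k+1)).take m)
          (left ++ [w.take k])
          (right ++ [(w.drop (k+1)).drop (m+1)]) := by
  rw [splitLoop.eq_def]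
  split
  · rename_i hk
    rw [h] at hk
    cases hk
  · rename_i k' hk
    rw [h] at hk
    cases hk
    have hc : ((k : Int) + 1) = ((k + 1 : Nat) : Int) := by push_cast; ring
    have hm : ((m : Int) + 1) = ((m + 1 : Nat) : Int) := by push_cast; ring
    simp only [PySem.List.pyGetD_natCast, hc, hm, PySem.List.slice_from_natCast,
      PySem.List.slice_to_natCast] at h2 ⊢
    rw [h2]
    simp only [hm, PySem.List.slice_from_natCast]

-- the left/right accumulators of splitLoop only grow at the back
theorem splitLoop_acc (n : Nat) (w : List Char) (hn : w.length = n)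
    (cnt : PySem.Dict Char Int) (left right : List (List Char)) :
    splitLoop cnt w left right
      = (left ++ (splitLoop cnt w [] []).1, right ++ (splitLoop cnt w [] []).2.1,
         (splitLoop cnt w [] []).2.2) := by
  induction n using Nat.strong_induction_on generalizing w cnt left right with
  | _ n ih =>
    cases hf : altFind cnt w with
    | none => rw [splitLoop_none _ _ _ _ hf, splitLoop_none _ _ _ _ hf]; simp
    | some k =>
      have hk := altFind_lt cnt w k hf
      cases hl : lastFind (cnt.insert (w.getD k ' ') (cnt.getD (w.getD k ' ') 0 - 1))
          (w.drop (k+1)) with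
      | none =>
        rw [splitLoop_some_none _ _ _ _ _ hf hl, splitLoop_some_none _ _ [] [] _ hf hl]
        simp
      | some m =>
        have hlen : ((w.drop (k+1)).take m).length < n := by
          simp only [List.length_take, List.length_drop]
          omega
        rw [splitLoop_some_some _ _ _ _ _ _ hf hl, splitLoop_some_some _ _ [] [] _ _ hf hl,
          ih _ hlen _ rfl _ (left ++ [w.take k]) (right ++ [(w.drop (k+1)).drop (m+1)]),
          ih _ hlen _ rfl _ ([] ++ [w.take k]) ([] ++ [(w.drop (k+1)).drop (m+1)])]
        simp

-- B's loop reassembly computes goRec of the whole window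
theorem splitLoop_goRec (n : Nat) (w : List Char) (hn : w.length = n)
    (cnt : PySem.Dict Char Int) :
    ((splitLoop cnt w [] []).1.flatten ++ (splitLoop cnt w [] []).2.2.1
        ++ (splitLoop cnt w [] []).2.1.reverse.flatten = (goRec cnt w).1)
    ∧ ((splitLoop cnt w [] []).2.2.2 = !(goRec cnt w).2) := by
  induction n using Nat.strong_induction_on generalizing w cnt with
  | _ n ih =>
    cases hf : altFind cnt w with
    | none =>
      rw [splitLoop_none _ _ _ _ hf, goRec_none _ _ hf]
      simp
    | some k =>
      have hk := altFind_lt cnt w k hf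
      have hgo := goRec_some cnt w k hf
      cases hl : lastFind (cnt.insert (w.getD k ' ') (cnt.getD (w.getD k ' ') 0 - 1))
          (w.drop (k+1)) with
      | none =>
        have hrev : altFind (cnt.insert (w.getD k ' ') (cnt.getD (w.getD k ' ') 0 - 1))
            ((w.drop (k+1)).reverse) = none := by
          rw [lastFind_mirror] at hl
          exact Option.map_eq_none_iff.mp hl
        rw [splitLoop_some_none _ _ _ _ _ hf hl, hgo, goRec_none _ _ hrev]
        simp
      | some m =>
        -- translate the backward find to a forward find on the reversed remainder
        have hlm := hl
        rw [lastFind_mirror] at hlm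
        obtain ⟨p, hp, hmp⟩ := Option.map_eq_some_iff.mp hlm
        have hmp' : (w.drop (k+1)).length - 1 - p = m := hmp
        have hplt : p < (w.drop (k+1)).length := by
          have := altFind_lt _ _ _ hp
          simpa using this
        have hm1 : m + 1 = (w.drop (k+1)).length - p := by omega

        have hmlt : m < (w.drop (k+1)).length := by omega
        have hc2 : ((w.drop (k+1)).reverse).getD p ' ' = (w.drop (k+1)).getD m ' ' := by
          rw [List.getD_eq_getElem _ ' ' (by simpa using hplt),
            List.getD_eq_getElem _ ' ' hmlt, List.getElem_reverse]
          simp only [hmp']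
        have htk : ((w.drop (k+1)).reverse).take p = ((w.drop (k+1)).drop (m+1)).reverse := by
          rw [List.take_reverse, hm1]
        have hdr : ((w.drop (k+1)).reverse).drop (p+1) = ((w.drop (k+1)).take m).reverse := by
          rw [List.drop_reverse,
            show (List.drop (k+1) w).length - (p+1) = m by omega]
        have hgo2 := goRec_some _ ((w.drop (k+1)).reverse) p hp
        rw [hc2, htk, hdr, List.reverse_reverse] at hgo2
        have hlen : ((w.drop (k+1)).take m).length < n := by
          simp only [List.length_take, List.length_drop]
          omega
        obtain ⟨ih1, ih2⟩ := ih _ hlen ((w.drop (k+1)).take m) rfl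
          ((cnt.insert (w.getD k ' ') (cnt.getD (w.getD k ' ') 0 - 1)).insert
             ((w.drop (k+1)).getD m ' ')
             ((cnt.insert (w.getD k ' ') (cnt.getD (w.getD k ' ') 0 - 1)).getD
                ((w.drop (k+1)).getD m ' ') 0 - 1))
        rw [splitLoop_some_some _ _ _ _ _ _ hf hl, hgo, hgo2,
          splitLoop_acc _ _ rfl _ ([] ++ [w.take k]) ([] ++ [(w.drop (k+1)).drop (m+1)])]
        constructor
        · simp only [List.nil_append, List.reverse_append, List.reverse_cons,
            List.reverse_nil, List.nil_append, List.flatten_append, List.flatten_cons,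
            List.flatten_nil, List.append_nil, List.reverse_reverse]
          rw [← ih1]
          simp
        · simpa using ih2

-- ===== VERDICT (by name: the statement is the Claim_ definition above) =====
theorem removeReverse_spec : Claim_equal_removeReverse := by
  intro s _ hpre
  unfold Spec_removeReverse removeReverse removeReverse_alt
  simp only
  obtain ⟨M, hloop, hfil⟩ := loop_spec s.toList.length s.toList [] []
    (removeReverseCount s.toList) true rfl hpre
  simp only [List.nil_append, List.append_nil, List.length_nil, Nat.cast_zero,
    zero_add] at hloop hfil
  rw [hloop]
  obtain ⟨hb1, hb2⟩ := splitLoop_goRec s.toList.length s.toList rfl (altCount s.toList)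
  rw [hb1, hb2]
  rw [PySem.List.foldl_append_ite_eq_filter]
  simp only [List.nil_append]
  rw [hfil, count_eq]
  cases hgb : (goRec (altCount s.toList) s.toList).2 <;> simp
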